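-- pv_equiv track=rewrite | github.com/alisonhc/example_classifier | classifier/evp_dataset_creation.py | recursively_expand_slashes
-- ===== SOURCE A (Python) =====
-- def recursively_expand_slashes(toks):
--     example_list = []
--
--     def recurse_slashes(tokens, new_tokens):
--         if not tokens:
--             example_list.append(' '.join(new_tokens))
--             return
--         to_check = tokens[0]
--         if '/' in to_check:
--             options = to_check.split('/')
--             for opt in options:
--                 recurse_slashes(tokens[1:], new_tokens + [opt])
--         else:
--             recurse_slashes(tokens[1:], new_tokens + [to_check])
--     recurse_slashes(toks, [])
--     return example_list
-- ===== SOURCE B (Python) =====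
-- def recursively_expand_slashes(toks):
--     combos = [[]]
--     for tok in toks:
--         opts = tok.split('/') if '/' in tok else [tok]
--         combos = [c + [o] for c in combos for o in opts]
--     return [' '.join(c) for c in combos]
-- ===== Notes on version B (the rewrite author's own statement) =====
-- stated objective: simpler
-- what changed: Replaces the recursive helper (which re-slices tokens[1:] and copies new_tokens at every call) with a single iterative loop that Cartesian-products each token's options into an accumulator list, joining once at the end.
import Mathlib
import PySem

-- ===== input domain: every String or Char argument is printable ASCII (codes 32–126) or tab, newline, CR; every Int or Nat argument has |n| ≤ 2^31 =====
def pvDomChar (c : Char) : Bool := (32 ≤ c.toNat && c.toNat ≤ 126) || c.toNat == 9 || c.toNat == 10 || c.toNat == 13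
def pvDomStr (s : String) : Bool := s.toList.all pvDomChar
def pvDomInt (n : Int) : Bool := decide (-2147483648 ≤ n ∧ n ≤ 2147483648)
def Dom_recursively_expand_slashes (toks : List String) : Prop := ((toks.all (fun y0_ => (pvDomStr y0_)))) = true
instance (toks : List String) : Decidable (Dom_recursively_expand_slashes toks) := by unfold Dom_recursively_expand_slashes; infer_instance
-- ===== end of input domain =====

-- B replaces A's recursive helper with one iterative Cartesian-product pass over an accumulator (objective: simpler).

-- ===== PORT A =====
-- inner 'recurse_slashes(tokens, new_tokens)': appends to example_list, here returned as the result list in append order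
def pvRecurseSlashes (tokens : List String) (new_tokens : List String) : List String :=
  match tokens with
  | [] => [PySem.Str.join " " new_tokens]
  | to_check :: rest =>
    if PySem.Str.isIn "/" to_check then
      ((PySem.Str.split? to_check "/").getD []).flatMap (fun opt => pvRecurseSlashes rest (new_tokens ++ [opt]))
    else
      pvRecurseSlashes rest (new_tokens ++ [to_check])

def recursively_expand_slashes (toks : List String) : List String :=
  pvRecurseSlashes toks []

-- ===== PORT B =====
-- one step of B's loop body: combos = [c + [o] for c in combos for o in opts]
def pvStep (combos : List (List String)) (tok : String) : List (List String) :=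
  let opts := if PySem.Str.isIn "/" tok then (PySem.Str.split? tok "/").getD [] else [tok]
  combos.flatMap (fun c => opts.map (fun o => c ++ [o]))

def recursively_expand_slashes_alt (toks : List String) : List String :=
  (toks.foldl pvStep [[]]).map (fun c => PySem.Str.join " " c)

-- ===== PRECONDITION & SPEC =====
def Spec_recursively_expand_slashes (toks : List String) (out : List String) : Prop := out = recursively_expand_slashes_alt toks
instance (toks : List String) (out : List String) : Decidable (Spec_recursively_expand_slashes toks out) := by unfold Spec_recursively_expand_slashes; infer_instance

-- ===== CLAIM (what is proved, stated in full; the proofs are below) =====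
def Claim_equal_recursively_expand_slashes : Prop := ∀ (toks : List String), Dom_recursively_expand_slashes toks → Spec_recursively_expand_slashes toks (recursively_expand_slashes toks)

-- ===== LEMMAS AND PROOFS =====

-- folding B's step from a list of partial combos = flatMap of folding from each singleton state
theorem pv_foldl_step_flatMap (toks : List String) :
    ∀ (cs : List (List String)), toks.foldl pvStep cs = cs.flatMap (fun c => toks.foldl pvStep [c]) := by
  induction toks with
  | nil => intro cs; simp
  | cons t rest ih =>
    intro cs
    have h2 : ∀ c : List String,
        (t :: rest).foldl pvStep [c] = (pvStep [c] t).flatMap (fun c' => rest.foldl pvStep [c']) := by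
      intro c; rw [List.foldl_cons, ih]
    rw [List.foldl_cons, ih (pvStep cs t)]
    simp only [h2]
    simp [pvStep, List.flatMap_assoc]

-- A's recursion with accumulator acc computes B's fold started from [acc]
theorem pv_recurse_eq_fold (toks : List String) :
    ∀ (acc : List String),
      pvRecurseSlashes toks acc = (toks.foldl pvStep [acc]).map (fun c => PySem.Str.join " " c) := by
  induction toks with
  | nil => intro acc; simp [pvRecurseSlashes]
  | cons t rest ih =>
    intro acc
    rw [pvRecurseSlashes]
    simp only [List.foldl_cons]
    rw [pv_foldl_step_flatMap rest (pvStep [acc] t)]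
    simp only [pvStep, ih]
    split
    · simp [List.map_flatMap, List.flatMap_map]
    · simp

-- ===== VERDICT (by name: the statement is the Claim_ definition above) =====
theorem recursively_expand_slashes_spec : Claim_equal_recursively_expand_slashes := by
  intro toks _
  unfold Spec_recursively_expand_slashes recursively_expand_slashes recursively_expand_slashes_alt
  exact pv_recurse_eq_fold toks []
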